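-- pv_equiv track=rewrite | github.com/plbalbi/APHEDE-image-equ | converter.py | multiplicar_circular
-- ===== SOURCE A (Python) =====
-- def multiplicar_circular(img,c):
--     for f in range(len(img)):
--         for j in range(len(img[f])):
--             val = img[f][j]*c
--             while val > 255:
--                 val -= 255
--             img[f][j] = val
--     return img
-- ===== SOURCE B (Python) =====
-- def multiplicar_circular(img, c):
--     return [[v * c if v * c <= 255 else (v * c - 1) % 255 + 1 for v in row]
--             for row in img]
-- ===== Notes on version B (the rewrite author's own statement) =====
-- stated objective: faster
-- what changed: Replaces the repeated-subtraction while loop with the closed form ((v*c-1) % 255) + 1 and builds the result with comprehensions instead of in-place index mutation; note A mutates img in place while B returns a fresh list (return value is identical).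
import Mathlib
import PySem

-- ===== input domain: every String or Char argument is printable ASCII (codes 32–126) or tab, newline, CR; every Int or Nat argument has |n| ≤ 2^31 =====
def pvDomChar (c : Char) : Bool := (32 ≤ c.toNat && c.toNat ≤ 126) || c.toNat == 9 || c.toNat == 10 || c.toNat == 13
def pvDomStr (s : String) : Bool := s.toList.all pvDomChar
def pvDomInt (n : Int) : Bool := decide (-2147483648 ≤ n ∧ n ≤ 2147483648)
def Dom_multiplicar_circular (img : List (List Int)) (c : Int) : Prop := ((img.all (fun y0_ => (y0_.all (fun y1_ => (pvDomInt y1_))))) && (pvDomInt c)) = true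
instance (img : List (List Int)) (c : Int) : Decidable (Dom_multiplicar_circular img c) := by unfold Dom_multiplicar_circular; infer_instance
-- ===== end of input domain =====

-- B replaces A's repeated-subtraction while loop by the closed form ((v*c-1) % 255)+1 and
-- builds a fresh list with maps; A mutates img in place — the equivalence is about the return value.

-- ===== PORT A =====
-- the 'while val > 255: val -= 255' loop
def pvWrap (val : Int) : Int :=
  if val > 255 then pvWrap (val - 255) else val
termination_by val.toNat
decreasing_by omega

def multiplicar_circular (img : List (List Int)) (c : Int) : List (List Int) :=
  (List.range img.length).foldl (fun acc f =>
    let row := acc.getD f []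
    let row' := (List.range row.length).foldl
      (fun r j => r.set j (pvWrap ((r.getD j 0) * c))) row
    acc.set f row') img

-- ===== PORT B =====
def multiplicar_circular_alt (img : List (List Int)) (c : Int) : List (List Int) :=
  img.map (fun row => row.map (fun v =>
    if v * c ≤ 255 then v * c else PySem.Int.mod (v * c - 1) 255 + 1))

-- ===== PRECONDITION & SPEC =====
def Spec_multiplicar_circular (img : List (List Int)) (c : Int) (out : List (List Int)) : Prop := out = multiplicar_circular_alt img c
instance (img : List (List Int)) (c : Int) (out : List (List Int)) : Decidable (Spec_multiplicar_circular img c out) := by unfold Spec_multiplicar_circular; infer_instance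

-- ===== CLAIM (what is proved, stated in full; the proofs are below) =====
def Claim_equal_multiplicar_circular : Prop := ∀ (img : List (List Int)) (c : Int), Dom_multiplicar_circular img c → Spec_multiplicar_circular img c (multiplicar_circular img c)

-- ===== LEMMAS AND PROOFS =====

theorem pvWrap_eq (x : Int) :
    pvWrap x = if x ≤ 255 then x else PySem.Int.mod (x - 1) 255 + 1 := by
  fun_induction pvWrap x with
  | case1 v h ih =>
      rw [ih]
      rw [PySem.Int.mod_eq_emod_of_pos (by norm_num), PySem.Int.mod_eq_emod_of_pos (by norm_num)]
      split_ifs <;> omega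
  | case2 v h =>
      simp [show v ≤ 255 by omega]

-- the index-fold with List.set is mapping g over the first n entries
theorem foldl_set_range {α : Type} (d : α) (g : α → α) :
    ∀ (n : Nat) (xs : List α), n ≤ xs.length →
    (List.range n).foldl (fun r j => r.set j (g (r.getD j d))) xs
      = (xs.take n).map g ++ xs.drop n := by
  intro n
  induction n with
  | zero => intro xs _; simp
  | succ n ih =>
      intro xs hn
      rw [List.range_succ, List.foldl_append, ih xs (by omega)]
      have hlt : n < xs.length := by omega
      have hlen : ((xs.take n).map g).length = n := by
        simp [List.length_take, Nat.min_eq_left (by omega : n ≤ xs.length)]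
      have hdrop : xs.drop n = xs[n] :: xs.drop (n + 1) :=
        List.drop_eq_getElem_cons hlt
      simp only [List.foldl_cons, List.foldl_nil]
      rw [hdrop]
      rw [List.getD_append_right _ _ _ _ (le_of_eq hlen), hlen]
      simp only [Nat.sub_self, List.getD_cons_zero]
      rw [List.set_append_right _ _ (le_of_eq hlen), hlen, Nat.sub_self]
      simp only [List.set_cons_zero]
      have hlt' : n < (List.map g xs).length := by simpa using hlt
      have htake : List.take (n+1) (List.map g xs) = List.take n (List.map g xs) ++ [g xs[n]] := by
        rw [List.take_add_one, List.getElem?_eq_getElem hlt']; simp [List.getElem_map]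
      simp [htake]

theorem foldl_set_range_full {α : Type} (d : α) (g : α → α) (xs : List α) :
    (List.range xs.length).foldl (fun r j => r.set j (g (r.getD j d))) xs = xs.map g := by
  simpa using foldl_set_range d g xs.length xs le_rfl

-- ===== VERDICT (by name: the statement is the Claim_ definition above) =====
theorem multiplicar_circular_spec : Claim_equal_multiplicar_circular := by
  intro img c _
  unfold Spec_multiplicar_circular multiplicar_circular multiplicar_circular_alt
  simp only []
  rw [foldl_set_range_full ([] : List Int)
      (fun row => (List.range row.length).foldl (fun r j => r.set j (pvWrap ((r.getD j 0) * c))) row) img]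
  refine List.map_congr_left ?_
  intro row _
  rw [foldl_set_range_full (0 : Int) (fun v => pvWrap (v * c)) row]
  refine List.map_congr_left ?_
  intro v _
  exact pvWrap_eq (v * c)
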